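-- pv_equiv track=rewrite | github.com/Romario27/Intro-Taller-de-Programacion | Introduccion/Examenes/rramirez-parcial I.py | formarLista_aux
-- ===== SOURCE A (Python) =====
-- def formarLista_aux(num):
--     if num==0:
--         return []
--     else:
--         if (num%10)%2==0 or num%10==0:
--             return [num%10] + formarLista_aux(num//10)
--         else:
--             return formarLista_aux(num//10)
-- ===== SOURCE B (Python) =====
-- def formarLista_aux(num):
--     result = []
--     while num != 0:
--         d = num % 10
--         if d % 2 == 0:
--             result.append(d)
--         num //= 10
--     return result
-- ===== Notes on version B (the rewrite author's own statement) =====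
-- stated objective: idiomatic
-- what changed: Replaces the recursive digit-peeling (which builds the list by prepending through the call stack) with an iterative while-loop that appends even digits to an accumulator; the redundant second disjunct of A's evenness test is dropped.
import Mathlib
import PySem

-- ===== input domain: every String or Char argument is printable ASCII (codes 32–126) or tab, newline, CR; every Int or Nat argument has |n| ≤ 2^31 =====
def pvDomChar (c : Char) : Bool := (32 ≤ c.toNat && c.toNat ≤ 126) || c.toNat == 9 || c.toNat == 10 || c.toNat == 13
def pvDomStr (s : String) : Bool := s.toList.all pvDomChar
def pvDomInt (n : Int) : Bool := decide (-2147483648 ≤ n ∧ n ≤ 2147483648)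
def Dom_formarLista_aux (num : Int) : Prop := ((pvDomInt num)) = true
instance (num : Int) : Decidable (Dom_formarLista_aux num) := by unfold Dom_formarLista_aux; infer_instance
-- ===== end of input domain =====

-- B is the iterative form of the same task: a while-loop appending even digits (return value only).

-- ===== PORT A =====
-- A's recursion on num//10 does not terminate for negative num (Python hits RecursionError);
-- the fuel num.natAbs + 1 is a totality guard only: it never runs out on the inputs Pre_ admits.
def formarLista_aux_fuel : Nat → Int → List Int
  | 0, _ => []
  | f + 1, num =>
    if num = 0 then []
    else
      if PySem.Int.mod (PySem.Int.mod num 10) 2 = 0 ∨ PySem.Int.mod num 10 = 0 then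
        [PySem.Int.mod num 10] ++ formarLista_aux_fuel f (PySem.Int.floordiv num 10)
      else
        formarLista_aux_fuel f (PySem.Int.floordiv num 10)

def formarLista_aux (num : Int) : List Int := formarLista_aux_fuel (num.natAbs + 1) num

-- ===== PORT B =====
-- while num != 0: append even digit, num //= 10 (same fuel guard; never exhausted on Pre_).
def formarLista_aux_alt_loop : Nat → Int → List Int → List Int
  | 0, _, result => result
  | f + 1, num, result =>
    if num = 0 then result
    else
      let d := PySem.Int.mod num 10
      formarLista_aux_alt_loop f (PySem.Int.floordiv num 10)
        (if PySem.Int.mod d 2 = 0 then result ++ [d] else result)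

def formarLista_aux_alt (num : Int) : List Int := formarLista_aux_alt_loop (num.natAbs + 1) num []

-- ===== PRECONDITION & SPEC =====
-- Pre_ excludes negative num, on which A recurses without reaching the base case and raises RecursionError.
def Pre_formarLista_aux (num : Int) : Prop := 0 ≤ num
instance (num : Int) : Decidable (Pre_formarLista_aux num) := by unfold Pre_formarLista_aux; infer_instance
def pvWitness_formarLista_aux : Int := (2468)

def Spec_formarLista_aux (num : Int) (out : List Int) : Prop := out = formarLista_aux_alt num
instance (num : Int) (out : List Int) : Decidable (Spec_formarLista_aux num out) := by unfold Spec_formarLista_aux; infer_instance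

-- ===== CLAIM (what is proved, stated in full; the proofs are below) =====
def Claim_equal_formarLista_aux : Prop := ∀ (num : Int), Dom_formarLista_aux num → Pre_formarLista_aux num → Spec_formarLista_aux num (formarLista_aux num)

-- ===== LEMMAS AND PROOFS =====

theorem loop_eq_fuel (f : Nat) : ∀ (num : Int) (acc : List Int), 0 ≤ num →
    formarLista_aux_alt_loop f num acc = acc ++ formarLista_aux_fuel f num := by
  induction f with
  | zero => intro num acc _; simp [formarLista_aux_alt_loop, formarLista_aux_fuel]
  | succ f ih =>
    intro num acc hnum
    by_cases h0 : num = 0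
    · simp [formarLista_aux_alt_loop, formarLista_aux_fuel, h0]
    · have hpos : 0 < num := lt_of_le_of_ne hnum (Ne.symm h0)
      have hq : 0 ≤ PySem.Int.floordiv num 10 := by
        rw [PySem.Int.floordiv_eq_ediv_of_pos (by omega)]
        exact Int.ediv_nonneg hnum (by norm_num)
      have hd : PySem.Int.mod num 10 = num % 10 := PySem.Int.mod_eq_emod_of_pos (by omega)
      have hd2 : ∀ x : Int, PySem.Int.mod x 2 = x % 2 := fun x => PySem.Int.mod_eq_emod_of_pos (by omega)
      -- A's 'd%2==0 or d==0' collapses to 'd%2==0' (d==0 implies d%2==0)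
      have hcond : (PySem.Int.mod (PySem.Int.mod num 10) 2 = 0 ∨ PySem.Int.mod num 10 = 0)
          ↔ PySem.Int.mod (PySem.Int.mod num 10) 2 = 0 := by
        constructor
        · rintro (h | h)
          · exact h
          · rw [h, hd2]; rfl
        · exact Or.inl
      simp only [formarLista_aux_alt_loop, formarLista_aux_fuel, if_neg h0]
      rw [ih _ _ hq]
      by_cases he : PySem.Int.mod (PySem.Int.mod num 10) 2 = 0
      · rw [if_pos he, if_pos (hcond.mpr he)]; simp
      · rw [if_neg he, if_neg (fun h => he (hcond.mp h))]

-- ===== VERDICT (by name: the statement is the Claim_ definition above) =====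
theorem formarLista_aux_spec : Claim_equal_formarLista_aux := by
  intro num _ hpre
  unfold Spec_formarLista_aux formarLista_aux formarLista_aux_alt
  rw [loop_eq_fuel _ _ _ hpre]
  simp
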